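-- pv_equiv track=rewrite | github.com/jfm-code/mi-codesignal | matrix_practice/horizontal traversal prime/main.py | zigzag_traverse_and_primes
-- ===== SOURCE A (Python) =====
-- import math
--
-- def is_prime(n):
--     # number 1 is not prime
--     if n == 1: return False
--
--     # number 2 is prime, this is an exception, cause all even numbers are not prime, except 2
--     elif n == 2: return True
--
--     # even numbers are not prime
--     elif n % 2 == 0: return False
--
--     # prime numbers must be bigger than 2
--     else:
--         for divisor in range(3, int(math.sqrt(n))+1, 2):
--             if n % divisor == 0:
--                 return False
--         return True
--
-- def zigzag_traverse_and_primes(matrix):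
--     rows, cols = len(matrix), len(matrix[0])
--     r = c = 0
--     result = {}
--     order = []
--     dir = 'right'
--     for _ in range(rows*cols):
--         if 0 <= r < rows and 0 <= c < cols:
--             order.append(matrix[r][c])
--         if dir == 'right':
--             if c < cols-1:
--                 c += 1
--             else:
--                 dir = 'left'
--                 r += 1
--         else:
--             if c > 0:
--                 c -= 1
--             else:
--                 dir = 'right'
--                 r += 1
--
--     for i, n in enumerate(order, start=1):
--         if is_prime(n):
--             result[i] = n
--     return result
-- ===== SOURCE B (Python) =====
-- import math
--
-- def is_prime(n):
--     if n == 2: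
--         return True
--     if n < 2 or n % 2 == 0:
--         return False
--     return all(n % d for d in range(3, math.isqrt(n) + 1, 2))
--
-- def zigzag_traverse_and_primes(matrix):
--     rows, cols = len(matrix), len(matrix[0])
--     order = [matrix[i][j if i % 2 == 0 else cols - 1 - j]
--              for i in range(rows) for j in range(cols)]
--     return {k: n for k, n in enumerate(order, 1) if is_prime(n)}
-- ===== Notes on version B (the rewrite author's own statement) =====
-- stated objective: simpler
-- what changed: Replaces the direction state machine with rows*cols single-cell steps and mutable (r,c,dir) state by one comprehension over (i,j) index pairs that reads matrix[i][j] or matrix[i][cols-1-j] by row parity, and replaces the explicit dict-building loop with a dict comprehension over enumerate; is_prime uses guard clauses and all() over math.isqrt.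
import Mathlib
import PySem

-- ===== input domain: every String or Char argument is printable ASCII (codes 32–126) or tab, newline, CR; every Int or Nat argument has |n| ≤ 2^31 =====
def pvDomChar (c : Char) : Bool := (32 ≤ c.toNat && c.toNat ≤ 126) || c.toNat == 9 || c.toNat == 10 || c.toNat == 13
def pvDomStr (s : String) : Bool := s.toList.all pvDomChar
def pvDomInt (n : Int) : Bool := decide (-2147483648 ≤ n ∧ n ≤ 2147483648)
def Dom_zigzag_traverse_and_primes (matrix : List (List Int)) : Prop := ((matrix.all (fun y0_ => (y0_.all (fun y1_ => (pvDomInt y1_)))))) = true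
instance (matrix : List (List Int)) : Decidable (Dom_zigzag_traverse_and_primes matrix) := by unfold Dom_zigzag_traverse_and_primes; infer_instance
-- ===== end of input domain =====

-- B replaces A's direction state machine (rows*cols single-cell steps) by a per-row
-- slice-and-reverse pass and a dict comprehension over enumerate: a simpler decomposition, same cost.


-- ===== PORT A =====
-- kernel-reducible integer square root (⌊√n⌋ for every n; fuel n+1 bounds the /4-recursion depth)
def isqrtF : Nat → Nat → Nat
  | 0, _ => 0
  | f+1, n => if n < 2 then n else
      let r := 2 * isqrtF f (n / 4)
      if (r+1)*(r+1) ≤ n then r+1 else r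
def pyIsqrt (n : Nat) : Nat := isqrtF (n+1) n

-- A's is_prime; int(math.sqrt(n)) is ported as pyIsqrt n.toNat = ⌊√n⌋, exact for 0 ≤ n ≤ 2^31
-- (on negative odd n Python raises ValueError in math.sqrt; those inputs are excluded by Pre_).
def isPrimeA (n : Int) : Bool :=
  if n == 1 then false
  else if n == 2 then true
  else if PySem.Int.mod n 2 == 0 then false
  else (PySem.List.pyRange 3 ((pyIsqrt n.toNat : Int) + 1) 2).all
    (fun d => !(PySem.Int.mod n d == 0))

-- A's 'for _ in range(rows*cols)' loop with its state (r, c, dir, order); dir true = 'right'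
def zzloop (matrix : List (List Int)) (rows cols : Int) :
    Nat → Int → Int → Bool → List Int → List Int
  | 0, _, _, _, order => order
  | fuel+1, r, c, dir, order =>
    let order' := if 0 ≤ r ∧ r < rows ∧ 0 ≤ c ∧ c < cols
      then order ++ [PySem.List.pyGetD (PySem.List.pyGetD matrix r []) c 0] else order
    if dir then
      if c < cols - 1 then zzloop matrix rows cols fuel r (c+1) dir order'
      else zzloop matrix rows cols fuel (r+1) c false order'
    else
      if c > 0 then zzloop matrix rows cols fuel r (c-1) dir order'
      else zzloop matrix rows cols fuel (r+1) c true order'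

def zigzag_traverse_and_primes (matrix : List (List Int)) : List (Int × Int) :=
  let rows : Int := matrix.length
  let cols : Int := matrix.headI.length   -- len(matrix[0]); Pre_ guarantees matrix ≠ []
  let order := zzloop matrix rows cols (rows * cols).toNat 0 0 true []
  ((PySem.List.enumerate order 1).foldl
    (fun d p => if isPrimeA p.2 then d.insert p.1 p.2 else d)
    (PySem.Dict.empty : PySem.Dict Int Int)).items

-- ===== PORT B =====
-- B's is_prime; math.isqrt(n) is pyIsqrt n.toNat (exact: n ≥ 0 whenever B reaches the loop)
def isPrimeB (n : Int) : Bool :=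
  if n == 2 then true
  else if n < 2 || PySem.Int.mod n 2 == 0 then false
  else (PySem.List.pyRange 3 ((pyIsqrt n.toNat : Int) + 1) 2).all
    (fun d => !(PySem.Int.mod n d == 0))

def zigzag_traverse_and_primes_alt (matrix : List (List Int)) : List (Int × Int) :=
  let rows : Int := matrix.length
  let cols : Int := matrix.headI.length   -- len(matrix[0]); Pre_ guarantees matrix ≠ []
  -- [matrix[i][j if i % 2 == 0 else cols-1-j] for i in range(rows) for j in range(cols)]
  let order := (PySem.List.pyRange 0 rows 1).flatMap (fun i =>
    (PySem.List.pyRange 0 cols 1).map (fun j =>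
      PySem.List.pyGetD (PySem.List.pyGetD matrix i [])
        (if PySem.Int.mod i 2 == 0 then j else cols - 1 - j) 0))
  -- {k: n for k, n in enumerate(order, 1) if is_prime(n)}: the keys strictly increase,
  -- so the dict in insertion order is exactly the filtered enumeration
  (PySem.List.enumerate order 1).filter (fun p => isPrimeB p.2)

-- ===== PRECONDITION & SPEC =====
-- Pre_ excludes exactly the inputs where A raises: the empty matrix and rows shorter than
-- the first row (IndexError), and matrices with a negative odd number among the traversed
-- entries (first len(matrix[0]) columns): math.sqrt of it raises ValueError inside is_prime.
def Pre_zigzag_traverse_and_primes (matrix : List (List Int)) : Prop :=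
  matrix ≠ [] ∧ ∀ row ∈ matrix, matrix.headI.length ≤ row.length ∧
    ∀ x ∈ row.take matrix.headI.length, 0 ≤ x ∨ PySem.Int.mod x 2 = 0
instance (matrix : List (List Int)) : Decidable (Pre_zigzag_traverse_and_primes matrix) := by unfold Pre_zigzag_traverse_and_primes; infer_instance

def pvWitness_zigzag_traverse_and_primes : List (List Int) := [[2, 3], [4, 5]]

def Spec_zigzag_traverse_and_primes (matrix : List (List Int)) (out : List (Int × Int)) : Prop := out = zigzag_traverse_and_primes_alt matrix
instance (matrix : List (List Int)) (out : List (Int × Int)) : Decidable (Spec_zigzag_traverse_and_primes matrix out) := by unfold Spec_zigzag_traverse_and_primes; infer_instance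

-- ===== CLAIM (what is proved, stated in full; the proofs are below) =====
def Claim_equal_zigzag_traverse_and_primes : Prop := ∀ (matrix : List (List Int)), Dom_zigzag_traverse_and_primes matrix → Pre_zigzag_traverse_and_primes matrix → Spec_zigzag_traverse_and_primes matrix (zigzag_traverse_and_primes matrix)

-- ===== LEMMAS AND PROOFS =====

-- the two is_prime ports agree on every non-negative or even argument
lemma isPrime_eq (n : Int) (h : 0 ≤ n ∨ PySem.Int.mod n 2 = 0) : isPrimeA n = isPrimeB n := by
  unfold isPrimeA isPrimeB
  by_cases h2 : n = 2
  · simp [h2]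
  by_cases h1 : n = 1
  · simp [h1]
  by_cases he : PySem.Int.mod n 2 = 0
  · rw [PySem.Int.mod_eq_zero_iff_dvd] at he
    simp [h1, h2, he]
  · have h0 : 0 ≤ n := h.resolve_right he
    have hlt : ¬ n < 2 := by
      rcases lt_or_ge n 2 with hl | hg
      · interval_cases n
        · exact absurd (by decide) he
        · exact absurd rfl h1
      · omega
    simp [h1, h2, hlt]

-- a conditional-insert fold is a fold over the filtered list
lemma foldl_ite_insert (l : List (Int × Int)) (d : PySem.Dict Int Int) (P : Int × Int → Bool) :
    l.foldl (fun d p => if P p then d.insert p.1 p.2 else d) d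
      = (l.filter P).foldl (fun d p => d.insert p.1 p.2) d := by
  induction l generalizing d with
  | nil => rfl
  | cons x xs ih =>
    simp only [List.foldl_cons, List.filter_cons]
    by_cases hx : P x <;> simp [hx, ih]

-- the first colsN entries of a row, read element-by-element over range(0, colsN)
lemma map_range_take (row : List Int) (colsN : Nat) (h : colsN ≤ row.length) :
    (PySem.List.pyRange 0 (colsN : Int) 1).map (fun j => PySem.List.pyGetD row j 0)
      = row.take colsN := by
  have hlen : PySem.List.len (row.take colsN) = (colsN : Int) := by
    simp [PySem.List.len_eq, List.length_take, Nat.min_eq_left h]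
  have h2 := PySem.List.map_pyGetD_pyRange_zero (row.take colsN) 0
  rw [hlen] at h2
  rw [← h2]
  apply List.map_congr_left
  intro j hj
  rw [PySem.List.mem_pyRange_one] at hj
  obtain ⟨h0, hlt⟩ := hj
  rw [PySem.List.pyGetD_of_nonneg _ _ h0, PySem.List.pyGetD_of_nonneg _ _ h0]
  rw [List.getD_eq_getElem?_getD, List.getD_eq_getElem?_getD, List.getElem?_take]
  have : j.toNat < colsN := by omega
  simp [this]

-- right sweep: cols-1-c further steps going right finish the row and flip at the wall
lemma sweepR (M : List (List Int)) (rows cols : Int) :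
    ∀ (m : Nat) (r c : Int) (fuel : Nat) (order : List Int),
      0 ≤ r → r < rows → 0 ≤ c → c + (m : Int) = cols - 1 →
      zzloop M rows cols (m + 1 + fuel) r c true order
        = zzloop M rows cols fuel (r+1) (cols-1) false
            (order ++ (PySem.List.pyRange c cols 1).map
              (fun j => PySem.List.pyGetD (PySem.List.pyGetD M r []) j 0)) := by
  intro m
  induction m with
  | zero =>
    intro r c fuel order hr0 hr1 hc0 hc
    have hceq : c = cols - 1 := by omega
    have : (0 + 1 + fuel) = fuel + 1 := by omega
    rw [this, zzloop]
    have hg : (0 ≤ r ∧ r < rows ∧ 0 ≤ c ∧ c < cols) := by omega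
    have hnc : ¬ c < cols - 1 := by omega
    simp only [hg, hnc, if_neg, not_false_iff]
    have hrange : PySem.List.pyRange c cols 1 = [c] := by
      rw [hceq]
      have := PySem.List.pyRange_one_singleton (cols - 1)
      rw [show cols - 1 + 1 = cols by omega] at this
      exact this
    rw [hrange, hceq]
    simp
  | succ m ih =>
    intro r c fuel order hr0 hr1 hc0 hc
    have : (m + 1 + 1 + fuel) = (m + 1 + fuel) + 1 := by omega
    rw [this, zzloop]
    have hg : (0 ≤ r ∧ r < rows ∧ 0 ≤ c ∧ c < cols) := by push_cast at hc ⊢; omega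
    have hlt : c < cols - 1 := by push_cast at hc ⊢; omega
    simp only [hg, hlt, if_pos]
    rw [ih r (c+1) fuel _ hr0 hr1 (by omega) (by push_cast at hc ⊢; omega)]
    rw [PySem.List.pyRange_one_cons (by omega : c < cols)]
    simp

-- left sweep: c further steps going left finish the row and flip at column 0
lemma sweepL (M : List (List Int)) (rows cols : Int) :
    ∀ (m : Nat) (r c : Int) (fuel : Nat) (order : List Int),
      0 ≤ r → r < rows → c < cols → c = (m : Int) →
      zzloop M rows cols (m + 1 + fuel) r c false order
        = zzloop M rows cols fuel (r+1) 0 true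
            (order ++ (PySem.List.pyRange c (-1) (-1)).map
              (fun j => PySem.List.pyGetD (PySem.List.pyGetD M r []) j 0)) := by
  intro m
  induction m with
  | zero =>
    intro r c fuel order hr0 hr1 hc1 hc
    have hceq : c = 0 := by omega
    have : (0 + 1 + fuel) = fuel + 1 := by omega
    rw [this, zzloop]
    have hg : (0 ≤ r ∧ r < rows ∧ 0 ≤ c ∧ c < cols) := by omega
    have hnc : ¬ c > 0 := by omega
    simp only [hg, hnc, if_neg, not_false_iff]
    have hrange : PySem.List.pyRange c (-1) (-1) = [c] := by
      rw [PySem.List.pyRange_neg_one_cons (by omega : (-1:Int) < c),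
          PySem.List.pyRange_neg_one_eq_nil (by omega : c - 1 ≤ -1)]
    rw [hrange, hceq]
    simp
  | succ m ih =>
    intro r c fuel order hr0 hr1 hc1 hc
    have : (m + 1 + 1 + fuel) = (m + 1 + fuel) + 1 := by omega
    rw [this, zzloop]
    have hg : (0 ≤ r ∧ r < rows ∧ 0 ≤ c ∧ c < cols) := by push_cast at hc ⊢; omega
    have hgt : c > 0 := by push_cast at hc ⊢; omega
    simp only [hg, hgt, if_pos]
    rw [ih r (c-1) fuel _ hr0 hr1 (by omega) (by push_cast at hc ⊢; omega)]
    rw [PySem.List.pyRange_neg_one_cons (by omega : (-1:Int) < c)]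
    simp

-- the traversal segment contributed by row number i
def seg (colsN : Nat) (p : Int × List Int) : List Int :=
  if PySem.Int.mod p.1 2 == 0 then p.2.take colsN else (p.2.take colsN).reverse

-- A's whole loop, processing the rows from index i on
lemma rowsLem (M : List (List Int)) (colsN : Nat) (hc : 1 ≤ colsN)
    (hlen : ∀ row ∈ M, colsN ≤ row.length) :
    ∀ (L : List (List Int)) (i : Nat), M.drop i = L → ∀ order,
      zzloop M (M.length : Int) (colsN : Int) (L.length * colsN) (i : Int)
          (if i % 2 = 0 then 0 else (colsN : Int) - 1) (decide (i % 2 = 0)) order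
        = order ++ (PySem.List.enumerate L (i : Int)).flatMap (seg colsN) := by
  intro L
  induction L with
  | nil =>
    intro i hdrop order
    simp [zzloop, PySem.List.enumerate]
  | cons row L' ih =>
    intro i hdrop order
    have hiM : i < M.length := by
      by_contra hge
      rw [List.drop_eq_nil_of_le (by omega)] at hdrop
      exact (List.cons_ne_nil _ _) hdrop.symm
    have hsplit : M[i] :: M.drop (i+1) = M.drop i := List.getElem_cons_drop hiM
    rw [hdrop] at hsplit
    have hrowM : M[i] = row := (List.cons.injEq _ _ _ _ ▸ hsplit).1
    have hdrop' : M.drop (i+1) = L' := (List.cons.injEq _ _ _ _ ▸ hsplit).2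
    have hget : PySem.List.pyGetD M (i : Int) [] = row := by
      rw [PySem.List.pyGetD_natCast]
      simp [List.getD_eq_getElem?_getD, hiM, hrowM]
    have hrow_len : colsN ≤ row.length := hlen row (by rw [← hrowM]; exact List.getElem_mem hiM)
    have hfuel : (row :: L').length * colsN = (colsN - 1) + 1 + L'.length * colsN := by
      rw [List.length_cons, Nat.succ_mul]
      generalize L'.length * colsN = K
      omega
    rw [hfuel]
    by_cases hpar : i % 2 = 0
    · -- even row: right sweep
      simp only [hpar, if_pos, decide_true]
      rw [sweepR M _ _ (colsN - 1) (i : Int) 0 (L'.length * colsN) order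
        (by positivity) (by exact_mod_cast hiM) le_rfl (by omega)]
      have hseg : (PySem.List.pyRange 0 (colsN : Int) 1).map
          (fun j => PySem.List.pyGetD (PySem.List.pyGetD M (i:Int) []) j 0) = row.take colsN := by
        rw [hget]; exact map_range_take row colsN hrow_len
      rw [hseg]
      have hpar' : ¬ (i+1) % 2 = 0 := by omega
      have hcast : (i : Int) + 1 = ((i+1 : Nat) : Int) := by push_cast; ring
      rw [hcast]
      have hih := ih (i+1) hdrop' (order ++ row.take colsN)
      simp only [hpar', ite_false, decide_false] at hih ⊢
      have hsegval : seg colsN ((i:Int), row) = row.take colsN := by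
        unfold seg
        have hm : PySem.Int.mod ((i:Int), row).1 2 = ((i % 2 : Nat) : Int) := by
          exact_mod_cast PySem.Int.mod_natCast i 2
        rw [hm, hpar]
        simp
      rw [PySem.List.enumerate_cons, List.flatMap_cons, hsegval, ← List.append_assoc, hcast]
      exact hih
    · -- odd row: left sweep
      simp only [hpar, ite_false, decide_false]
      rw [sweepL M _ _ (colsN - 1) (i : Int) ((colsN : Int) - 1) (L'.length * colsN) order
        (by positivity) (by exact_mod_cast hiM) (by omega) (by omega)]
      have hrev : (PySem.List.pyRange ((colsN:Int) - 1) (-1) (-1)).map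
          (fun j => PySem.List.pyGetD (PySem.List.pyGetD M (i:Int) []) j 0)
            = (row.take colsN).reverse := by
        rw [PySem.List.pyRange_neg_one_eq_reverse]
        rw [show (-1 : Int) + 1 = 0 by ring, show (colsN:Int) - 1 + 1 = (colsN:Int) by ring]
        rw [List.map_reverse, hget, map_range_take row colsN hrow_len]
      rw [hrev]
      have hpar' : (i+1) % 2 = 0 := by omega
      have hcast : (i : Int) + 1 = ((i+1 : Nat) : Int) := by push_cast; ring
      rw [hcast]
      have hih := ih (i+1) hdrop' (order ++ (row.take colsN).reverse)
      simp only [hpar', ite_true, decide_true] at hih ⊢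
      have hsegval : seg colsN ((i:Int), row) = (row.take colsN).reverse := by
        unfold seg
        have h1 : i % 2 = 1 := by omega
        have hm : PySem.Int.mod ((i:Int), row).1 2 = ((i % 2 : Nat) : Int) := by
          exact_mod_cast PySem.Int.mod_natCast i 2
        rw [hm, h1]
        simp
      rw [PySem.List.enumerate_cons, List.flatMap_cons, hsegval, ← List.append_assoc, hcast]
      exact hih

-- A's loop produces B's row-by-row order
lemma order_eq (M : List (List Int))
    (hlen : ∀ row ∈ M, M.headI.length ≤ row.length) :
    zzloop M (M.length : Int) (M.headI.length : Int)
        (((M.length : Int) * (M.headI.length : Int)).toNat) 0 0 true []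
      = (PySem.List.enumerate M 0).flatMap (seg M.headI.length) := by
  set colsN := M.headI.length with hcols
  have hfuel : (((M.length : Int) * (colsN : Int)).toNat) = M.length * colsN := by
    rw [show ((M.length : Int) * (colsN : Int)) = ((M.length * colsN : Nat) : Int) by push_cast; ring]
    exact Int.toNat_natCast _
  rw [hfuel]
  rcases Nat.eq_zero_or_pos colsN with h0 | hpos
  · rw [h0]
    simp only [zzloop]
    symm
    rw [List.flatMap_eq_nil_iff]
    intro p _
    unfold seg
    simp
  · have := rowsLem M colsN hpos hlen M 0 (by simp) []
    simpa using this

-- j ↦ cols-1-j reverses range(0, cols)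
lemma map_sub_range (colsN : Nat) :
    (PySem.List.pyRange 0 (colsN : Int) 1).map (fun j => (colsN : Int) - 1 - j)
      = (PySem.List.pyRange 0 (colsN : Int) 1).reverse := by
  apply List.ext_getElem
  · simp [PySem.List.length_pyRange_one]
  · intro k h1 h2
    have hlen : (PySem.List.pyRange 0 (colsN : Int) 1).length = colsN := by
      simp [PySem.List.length_pyRange_one]
    rw [List.getElem_map, List.getElem_reverse]
    rw [PySem.List.getElem_pyRange_one, PySem.List.getElem_pyRange_one]
    simp only [hlen] at h1 h2 ⊢
    have hk : k < colsN := by simpa [hlen] using h2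
    omega

-- B's order, written as the same flatMap of row segments
lemma orderB_eq (M : List (List Int))
    (hlen : ∀ row ∈ M, M.headI.length ≤ row.length) :
    (PySem.List.pyRange 0 (M.length : Int) 1).flatMap (fun i =>
      (PySem.List.pyRange 0 (M.headI.length : Int) 1).map (fun j =>
        PySem.List.pyGetD (PySem.List.pyGetD M i [])
          (if PySem.Int.mod i 2 == 0 then j else (M.headI.length : Int) - 1 - j) 0))
      = (PySem.List.enumerate M 0).flatMap (seg M.headI.length) := by
  set colsN := M.headI.length with hcols
  rw [PySem.List.enumerate_eq_map_pyRange M ([] : List Int), List.flatMap_map]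
  simp only [PySem.List.len_eq]
  apply List.flatMap_congr
  intro i hi
  rw [PySem.List.mem_pyRange_one] at hi
  obtain ⟨h0, hlt⟩ := hi
  have hrow : PySem.List.pyGetD M i [] ∈ M := by
    rw [PySem.List.pyGetD_eq_getElem M [] h0 (by simpa using hlt)]
    exact List.getElem_mem _
  have hrl : colsN ≤ (PySem.List.pyGetD M i []).length := hlen _ hrow
  unfold seg
  by_cases hp : (PySem.Int.mod i 2 == 0) = true
  · simp only [hp, if_pos]
    exact map_range_take _ colsN hrl
  · simp only [hp, if_neg, Bool.not_eq_true]
    have hcomp : (fun j => PySem.List.pyGetD (PySem.List.pyGetD M i []) ((colsN:Int) - 1 - j) 0)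
        = (fun j => PySem.List.pyGetD (PySem.List.pyGetD M i []) j 0)
            ∘ (fun j => (colsN:Int) - 1 - j) := rfl
    rw [hcomp, ← List.map_map, map_sub_range, List.map_reverse, map_range_take _ colsN hrl]

-- ===== VERDICT (by name: the statement is the Claim_ definition above) =====
theorem zigzag_traverse_and_primes_spec : Claim_equal_zigzag_traverse_and_primes := by
  intro matrix _ hpre
  obtain ⟨hne, hrows⟩ := hpre
  unfold Spec_zigzag_traverse_and_primes zigzag_traverse_and_primes zigzag_traverse_and_primes_alt
  simp only []
  rw [order_eq matrix (fun row hr => (hrows row hr).1), orderB_eq matrix (fun row hr => (hrows row hr).1)]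
  set T := (PySem.List.enumerate matrix 0).flatMap (seg matrix.headI.length) with hT
  -- every traversed value is non-negative or even (Pre_)
  have hvals : ∀ x ∈ T, 0 ≤ x ∨ PySem.Int.mod x 2 = 0 := by
    intro x hx
    rw [hT, List.mem_flatMap] at hx
    obtain ⟨p, hp, hxs⟩ := hx
    have hrow : p.2 ∈ matrix := by
      rw [PySem.List.mem_enumerate_iff] at hp
      obtain ⟨k, hk, rfl⟩ := hp
      exact List.getElem_mem hk
    have hxtake : x ∈ p.2.take matrix.headI.length := by
      unfold seg at hxs
      by_cases hb : (PySem.Int.mod p.1 2 == 0) = true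
      · rwa [if_pos hb] at hxs
      · rw [if_neg hb, List.mem_reverse] at hxs
        exact hxs
    exact (hrows p.2 hrow).2 x hxtake
  rw [foldl_ite_insert]
  have hfilter_eq : (PySem.List.enumerate T 1).filter (fun p => isPrimeA p.2)
      = (PySem.List.enumerate T 1).filter (fun p => isPrimeB p.2) := by
    apply List.filter_congr
    intro p hp
    have hmem : p.2 ∈ T := by
      rw [PySem.List.mem_enumerate_iff] at hp
      obtain ⟨k, hk, rfl⟩ := hp
      exact List.getElem_mem hk
    exact isPrime_eq p.2 (hvals p.2 hmem)
  have hnodup : (((PySem.List.enumerate T 1).filter (fun p => isPrimeA p.2)).map Prod.fst).Nodup := by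
    have hpw : ((PySem.List.enumerate T 1).filter (fun p => isPrimeA p.2)).Pairwise
        (fun p q => p.1 < q.1) := (PySem.List.pairwise_lt_enumerate T 1).filter _
    rw [List.Nodup, List.pairwise_map]
    exact hpw.imp (fun h => ne_of_lt h)
  rw [PySem.Dict.items_foldl_insert_fresh _ Prod.fst Prod.snd _
      (fun a _ => PySem.Dict.contains_empty a.1) hnodup]
  simp [hfilter_eq, PySem.Dict.empty]
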